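-- pv_equiv track=rewrite | github.com/Anwarvic/Behind-The-Name | 06-last_cleaning.py | formalize
-- ===== SOURCE A (Python) =====
-- def handle_endings(text):
-- 	endings = "._,()[]{})"
-- 	if text[0] in endings:
-- 		return handle_endings(text[1:])
-- 	elif  text[-1] in endings:
-- 		return handle_endings(text[:-1])
-- 	else:
-- 		return text.strip()
--
-- def formalize(lst):
-- 	output = handle_endings(str(lst[0]))+"("
-- 	length = len(lst)
-- 	for word in lst[1:]:
-- 		output += handle_endings(word)
-- 		if word != lst[length-1]:
-- 			output += ", "
-- 	output += ")"
-- 	return output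
-- ===== SOURCE B (Python) =====
-- def formalize(lst):
--     endings = "._,()[]{})"
--
--     def clean(t):
--         # two-pointer scan: find the first and last non-ending characters,
--         # take that single slice, then strip whitespace
--         i = 0
--         while t[i] in endings:
--             i += 1
--         j = len(t) - 1
--         while t[j] in endings:
--             j -= 1
--         return t[i:j + 1].strip()
--
--     last = lst[-1]
--     pieces = [clean(w) + ("" if w == last else ", ") for w in lst[1:]]
--     return clean(str(lst[0])) + "(" + "".join(pieces) + ")"
-- ===== Notes on version B (the rewrite author's own statement) =====
-- stated objective: alternative
-- what changed: Replaces the recursive helper (which copies a fresh slice per stripped character) by an iterative two-pointer scan that finds both trim points and takes one slice, and the separator-appending accumulator loop by a comprehension joined with ''.join; it trades A's recursion and += accumulation for index scans and a join.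
import Mathlib
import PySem

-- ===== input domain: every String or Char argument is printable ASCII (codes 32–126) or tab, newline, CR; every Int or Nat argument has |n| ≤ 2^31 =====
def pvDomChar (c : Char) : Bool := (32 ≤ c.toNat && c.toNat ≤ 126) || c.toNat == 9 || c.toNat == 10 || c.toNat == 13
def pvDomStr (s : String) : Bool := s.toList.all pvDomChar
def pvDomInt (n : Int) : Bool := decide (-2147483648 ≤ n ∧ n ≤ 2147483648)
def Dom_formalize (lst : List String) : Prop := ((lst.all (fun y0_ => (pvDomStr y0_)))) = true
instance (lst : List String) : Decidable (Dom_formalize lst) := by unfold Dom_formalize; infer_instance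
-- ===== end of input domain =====

-- B replaces the recursive slice-copying end-stripping helper by an iterative two-pointer scan
-- taking a single slice, and the accumulator loop by a joined comprehension (return values only).

-- the punctuation set both programs strip ("endings" in the Python)
def pvEndings : List Char := ['.', '_', ',', '(', ')', '[', ']', '{', '}', ')']   -- "._,()[]{})".toList

-- ===== PORT A =====
-- handle_endings: recursive, checks text[0] first, then text[-1], else text.strip().
-- Python raises IndexError on the empty string; the [] branch (excluded by Pre_) keeps the port total.
def handleEndings (text : List Char) : List Char :=
  match text with
  | [] => []
  | c :: rest =>
    if c ∈ pvEndings then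
      handleEndings rest                          -- handle_endings(text[1:])
    else if (c :: rest).getLast (by simp) ∈ pvEndings then
      handleEndings ((c :: rest).dropLast)        -- handle_endings(text[:-1])
    else
      PySem.Chars.strip (c :: rest)               -- text.strip()
termination_by text.length
decreasing_by
  · simp
  · simp [List.length_dropLast]

def formalize (lst : List String) : String :=
  let output0 := handleEndings ((PySem.List.pyGet? lst 0).getD "").toList ++ "(".toList
  let length : Int := PySem.List.len lst
  let out := (PySem.List.slice lst (some 1) none).foldl (fun output word =>
      let output := output ++ handleEndings word.toList
      if word ≠ (PySem.List.pyGet? lst (length - 1)).getD "" then output ++ ", ".toList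
      else output) output0
  String.ofList (out ++ ")".toList)

-- ===== PORT B =====
-- B's 'while t[i] in endings: i += 1' index scan, as recursion on the suffix t[i:]
-- (the [] case is where the Python scan raises IndexError; excluded by Pre_)
def scanFwd (t : List Char) : List Char :=
  match t with
  | [] => []
  | c :: rest => if c ∈ pvEndings then scanFwd rest else c :: rest

-- clean(t): forward scan for i, backward scan (the j loop, run on the reversed suffix),
-- then the single slice t[i:j+1] is what the scans left; finally .strip()
def cleanAlt (t : List Char) : List Char :=
  PySem.Chars.strip ((scanFwd (scanFwd t).reverse).reverse)

-- Python B raises IndexError on [] (lst[-1]); that branch is excluded by Pre_.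
def formalize_alt (lst : List String) : String :=
  match lst with
  | [] => ""
  | first :: rest =>
    let lastW := (first :: rest).getLast (by simp)     -- lst[-1]
    let pieces := rest.map (fun w => cleanAlt w.toList ++ (if w = lastW then [] else ", ".toList))
    String.ofList (cleanAlt first.toList ++ "(".toList ++ pieces.flatten ++ ")".toList)  -- "".join

-- ===== PRECONDITION & SPEC =====
-- Pre_ excludes exactly the inputs where Python A raises IndexError: the empty list, and lists
-- containing an element made only of characters of "._,()[]{})" (including the empty string).
def Pre_formalize (lst : List String) : Prop :=
  lst ≠ [] ∧ ∀ w ∈ lst, w.toList.any (fun c => !pvEndings.contains c) = true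
instance (lst : List String) : Decidable (Pre_formalize lst) := by unfold Pre_formalize; infer_instance
def pvWitness_formalize : List String := ["f", "x"]

def Spec_formalize (lst : List String) (out : String) : Prop := out = formalize_alt lst
instance (lst : List String) (out : String) : Decidable (Spec_formalize lst out) := by unfold Spec_formalize; infer_instance

-- ===== CLAIM (what is proved, stated in full; the proofs are below) =====
def Claim_equal_formalize : Prop := ∀ (lst : List String), Dom_formalize lst → Pre_formalize lst → Spec_formalize lst (formalize lst)

-- ===== LEMMAS AND PROOFS =====

theorem getLast_cons_concat (c r : Char) (rs : List Char) (h) :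
    (c :: (rs ++ [r])).getLast h = r := by simp

-- B's index scan is dropWhile of the punctuation set
theorem scanFwd_eq_dropWhile (t : List Char) :
    scanFwd t = t.dropWhile (fun c => decide (c ∈ pvEndings)) := by
  induction t with
  | nil => rfl
  | cons c rest ih => by_cases h : c ∈ pvEndings <;> simp [scanFwd, h, ih]

-- A's recursive end-stripper equals B's two-scan clean on every char list
theorem handle_eq (text : List Char) : handleEndings text = cleanAlt text := by
  induction text using handleEndings.induct with
  | case1 => simp [handleEndings, cleanAlt, scanFwd, PySem.Chars.strip,
      PySem.Chars.lstrip, PySem.Chars.rstrip]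
  | case2 c rest h ih =>
      rw [handleEndings, if_pos h, ih]
      simp [cleanAlt, scanFwd, h]
  | case3 c rest h hl ih =>
      rw [handleEndings, if_neg h, if_pos hl, ih]
      simp only [cleanAlt]
      congr 1
      rcases rest.eq_nil_or_concat' with rfl | ⟨rs, r, rfl⟩
      · simp at hl; exact absurd hl (by simpa using h)
      · rw [getLast_cons_concat] at hl
        rw [show (c :: (rs ++ [r])).dropLast = c :: rs by
          rw [← List.cons_append, List.dropLast_concat]]
        simp [scanFwd_eq_dropWhile, h, hl]
  | case4 c rest h hl =>
      rw [handleEndings, if_neg h, if_neg hl]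
      simp only [cleanAlt]
      congr 1
      rcases rest.eq_nil_or_concat' with rfl | ⟨rs, r, rfl⟩
      · simp [scanFwd_eq_dropWhile, h]
      · rw [getLast_cons_concat] at hl
        simp [scanFwd_eq_dropWhile, h, hl]

-- A's separator-appending accumulator loop, written as a flatMap
theorem foldl_sep (L : List String) (acc : List Char) (f : String → List Char) (lastW : String) :
    L.foldl (fun output word =>
      let output2 := output ++ f word
      if word ≠ lastW then output2 ++ ", ".toList else output2) acc
    = acc ++ L.flatMap (fun w => f w ++ (if w = lastW then [] else ", ".toList)) := by
  induction L generalizing acc with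
  | nil => simp
  | cons a L ih =>
      simp only [List.foldl_cons, List.flatMap_cons, ih]
      by_cases ha : a = lastW <;> simp [ha]

theorem formalize_cons (first : String) (rest : List String) :
    formalize (first :: rest) = formalize_alt (first :: rest) := by
  unfold formalize formalize_alt
  have hlast : (PySem.List.pyGet? (first :: rest) ((PySem.List.len (first :: rest)) - 1)).getD ""
      = (first :: rest).getLast (by simp) := by
    rw [show (PySem.List.len (first :: rest)) - 1 = ((rest.length : ℕ) : Int) by
      simp [PySem.List.len_eq]]
    rw [PySem.List.pyGet?_natCast]
    rw [show (first :: rest)[(rest.length : ℕ)]? = (first :: rest).getLast? by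
      rw [List.getLast?_eq_getElem?]; simp]
    rw [List.getLast?_eq_some_getLast (by simp)]
    rfl
  simp only [hlast, PySem.List.pyGet?_zero_cons, Option.getD_some, PySem.List.slice_from_one,
    List.tail_cons]
  rw [foldl_sep]
  simp [handle_eq, List.flatMap_def, List.append_assoc]

-- ===== VERDICT (by name: the statement is the Claim_ definition above) =====
theorem formalize_spec : Claim_equal_formalize := by
  intro lst _ hpre
  obtain ⟨first, rest, rfl⟩ := List.exists_cons_of_ne_nil hpre.1
  exact formalize_cons first rest
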